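-- pv_equiv track=rewrite | github.com/Abjad/abjad | trunk/abjad/tools/sequencetools/iterate_sequence_cyclically_from_start_to_stop.py | iterate_sequence_cyclically_from_start_to_stop
-- ===== SOURCE A (Python) =====
-- def iterate_sequence_cyclically_from_start_to_stop(sequence, start, stop):
--     '''.. versionadded:: 1.1
--
--     Iterate `sequence` cyclically from `start` to `stop`::
--
--         abjad> from abjad.tools import sequencetools
--
--     ::
--
--         abjad> list(sequencetools.iterate_sequence_cyclically_from_start_to_stop(range(20), 18, 10))
--         [18, 19, 0, 1, 2, 3, 4, 5, 6, 7, 8, 9]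
--
--     Return generator of references to `sequence` elements.
--
--     .. versionchanged:: 2.0
--         renamed ``sequencetools.get_cyclic()`` to
--         ``sequencetools.iterate_sequence_cyclically_from_start_to_stop()``.
--     '''
--
--     len_sequence = len(sequence)
--     cur_index = start
--     cyclic_stop = stop % len_sequence
--     while True:
--         cyclic_cur_index = cur_index % len_sequence
--         if cyclic_cur_index == cyclic_stop:
--             return
--         else:
--             yield sequence[cyclic_cur_index]
--             cur_index += 1
-- ===== SOURCE B (Python) =====
-- def iterate_sequence_cyclically_from_start_to_stop(sequence, start, stop):
--     len_sequence = len(sequence)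
--     begin = start % len_sequence
--     end = begin + (stop - start) % len_sequence
--     yield from (list(sequence) * 2)[begin:end]
-- ===== Notes on version B (the rewrite author's own statement) =====
-- stated objective: alternative
-- what changed: Replaces A's unbounded while-True loop with a per-element modular index and stop test by a single slice of the doubled list: since the yielded run has length (stop-start)%n < n, it is exactly (sequence*2)[start%n : start%n + (stop-start)%n], with no per-element arithmetic.
import Mathlib
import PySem

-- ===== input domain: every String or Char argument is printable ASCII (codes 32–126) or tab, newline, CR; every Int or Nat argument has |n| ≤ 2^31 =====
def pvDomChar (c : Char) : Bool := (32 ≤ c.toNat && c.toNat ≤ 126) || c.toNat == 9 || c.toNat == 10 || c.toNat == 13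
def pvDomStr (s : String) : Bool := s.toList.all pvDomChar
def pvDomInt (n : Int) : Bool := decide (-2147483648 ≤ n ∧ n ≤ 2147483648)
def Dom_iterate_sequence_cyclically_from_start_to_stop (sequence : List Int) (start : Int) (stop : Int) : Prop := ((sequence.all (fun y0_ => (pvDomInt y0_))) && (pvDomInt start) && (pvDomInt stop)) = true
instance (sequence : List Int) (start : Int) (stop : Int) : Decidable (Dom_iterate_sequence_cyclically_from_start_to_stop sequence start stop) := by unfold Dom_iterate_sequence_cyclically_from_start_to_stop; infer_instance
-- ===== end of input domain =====

-- B replaces A's unbounded while-True loop (per-element modular index and stop test)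
-- by one slice of the doubled list: same cost class, no per-element arithmetic.


-- ===== PORT A =====
-- A's `while True` loop; the fuel argument is only a totality guard (one more than
-- the number of iterations A performs suffices, see the proofs below).
def pvALoop (sequence : List Int) (n : Int) (cyclic_stop : Int) (cur_index : Int) : Nat → List Int
  | 0 => []
  | fuel + 1 =>
    let cyclic_cur_index := PySem.Int.mod cur_index n
    if cyclic_cur_index = cyclic_stop then []
    else
      match PySem.List.pyGet? sequence cyclic_cur_index with
      | none => []          -- unreachable: 0 ≤ cyclic_cur_index < n
      | some x => x :: pvALoop sequence n cyclic_stop (cur_index + 1) fuel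

def iterate_sequence_cyclically_from_start_to_stop (sequence : List Int) (start : Int) (stop : Int) : List Int :=
  let len_sequence : Int := sequence.length
  let cyclic_stop := PySem.Int.mod stop len_sequence
  pvALoop sequence len_sequence cyclic_stop start
    ((PySem.Int.mod (stop - start) len_sequence).toNat + 1)

-- ===== PORT B =====
def iterate_sequence_cyclically_from_start_to_stop_alt (sequence : List Int) (start : Int) (stop : Int) : List Int :=
  let len_sequence : Int := sequence.length
  let begin_ := PySem.Int.mod start len_sequence
  let end_ := begin_ + PySem.Int.mod (stop - start) len_sequence
  PySem.List.slice (sequence ++ sequence) (some begin_) (some end_)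

-- ===== PRECONDITION & SPEC =====
-- Pre_ excludes only the empty sequence, on which A (and B) raise ZeroDivisionError.
def Pre_iterate_sequence_cyclically_from_start_to_stop (sequence : List Int) (start : Int) (stop : Int) : Prop := sequence ≠ []
instance (sequence : List Int) (start : Int) (stop : Int) : Decidable (Pre_iterate_sequence_cyclically_from_start_to_stop sequence start stop) := by unfold Pre_iterate_sequence_cyclically_from_start_to_stop; infer_instance
def pvWitness_iterate_sequence_cyclically_from_start_to_stop : List Int × Int × Int := ([1, 2, 3], 0, 2)

def Spec_iterate_sequence_cyclically_from_start_to_stop (sequence : List Int) (start : Int) (stop : Int) (out : List Int) : Prop := out = iterate_sequence_cyclically_from_start_to_stop_alt sequence start stop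
instance (sequence : List Int) (start : Int) (stop : Int) (out : List Int) : Decidable (Spec_iterate_sequence_cyclically_from_start_to_stop sequence start stop out) := by unfold Spec_iterate_sequence_cyclically_from_start_to_stop; infer_instance

-- ===== CLAIM (what is proved, stated in full; the proofs are below) =====
def Claim_equal_iterate_sequence_cyclically_from_start_to_stop : Prop := ∀ (sequence : List Int) (start : Int) (stop : Int), Dom_iterate_sequence_cyclically_from_start_to_stop sequence start stop → Pre_iterate_sequence_cyclically_from_start_to_stop sequence start stop → Spec_iterate_sequence_cyclically_from_start_to_stop sequence start stop (iterate_sequence_cyclically_from_start_to_stop sequence start stop)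

-- ===== LEMMAS AND PROOFS =====

-- A's loop with (cyclic_stop - cur) % n = k remaining steps and enough fuel yields
-- exactly sequence[(cur+i) % n] for i = 0 .. k-1.
lemma pvALoop_eq (sequence : List Int) (hn : 0 < (sequence.length : Int)) (cstop : Int)
    (hcs0 : 0 ≤ cstop) (hcsn : cstop < (sequence.length : Int)) :
    ∀ (k : Nat) (cur : Int) (fuel : Nat),
      (cstop - cur) % (sequence.length : Int) = (k : Int) → k < fuel →
      pvALoop sequence (sequence.length : Int) cstop cur fuel
        = (List.range k).map
            (fun (i : Nat) => PySem.List.pyGetD sequence ((cur + (i : Int)) % (sequence.length : Int)) 0) := by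
  intro k
  induction k with
  | zero =>
    intro cur fuel hk hf
    obtain ⟨f, rfl⟩ : ∃ f, fuel = f + 1 := ⟨fuel - 1, by omega⟩
    have h1 : (cstop - cur) % (sequence.length : Int) = 0 := by simpa using hk
    have hcur : PySem.Int.mod cur (sequence.length : Int) = cstop := by
      rw [PySem.Int.mod_eq_emod_of_pos hn]
      have h2 : cur % (sequence.length : Int)
          = (cstop - (cstop - cur)) % (sequence.length : Int) := by norm_num
      rw [h2, Int.sub_emod, h1]
      simp [Int.emod_eq_of_lt hcs0 hcsn]
    simp [pvALoop, hcur]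
  | succ k ih =>
    intro cur fuel hk hf
    obtain ⟨f, rfl⟩ : ∃ f, fuel = f + 1 := ⟨fuel - 1, by omega⟩
    have hmodlt := Int.emod_lt_of_pos (cstop - cur) hn
    have hk' : (cstop - cur) % (sequence.length : Int) = (k : Int) + 1 := by
      rw [hk]; push_cast; ring
    have hklt : (k : Int) + 1 < (sequence.length : Int) := by omega
    have hcurmod : PySem.Int.mod cur (sequence.length : Int) = cur % (sequence.length : Int) :=
      PySem.Int.mod_eq_emod_of_pos hn
    have hc0 : 0 ≤ cur % (sequence.length : Int) := Int.emod_nonneg _ (by omega)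
    have hcn : cur % (sequence.length : Int) < (sequence.length : Int) := Int.emod_lt_of_pos _ hn
    have hne : ¬ (cur % (sequence.length : Int) = cstop) := by
      intro h
      have hz : (cstop - cur) % (sequence.length : Int) = 0 := by
        rw [Int.sub_emod, ← h]; simp
      omega
    have hget : PySem.List.pyGet? sequence (cur % (sequence.length : Int))
        = some (sequence[(cur % (sequence.length : Int)).toNat]'(by omega)) :=
      PySem.List.pyGet?_eq_some_getElem sequence hc0 hcn
    have h1n : (1 : Int) % (sequence.length : Int) = 1 :=
      Int.emod_eq_of_lt (by omega) (by omega)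
    have hnext : (cstop - (cur + 1)) % (sequence.length : Int) = (k : Int) := by
      have h1 : cstop - (cur + 1) = (cstop - cur) - 1 := by ring
      rw [h1, Int.sub_emod, hk', h1n]
      have h3 : (k : Int) + 1 - 1 = (k : Int) := by ring
      rw [h3]
      exact Int.emod_eq_of_lt (by omega) (by omega)
    have hrec := ih (cur + 1) f hnext (by omega)
    simp only [pvALoop, hcurmod, if_neg hne, hget]
    rw [hrec, List.range_succ_eq_map, List.map_cons, List.map_map]
    congr 1
    · simp only [Nat.cast_zero, add_zero]
      exact (PySem.List.pyGetD_eq_getElem sequence 0 hc0 hcn).symm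
    · apply List.map_congr_left
      intro i _
      simp only [Function.comp_apply]
      congr 2
      push_cast
      ring

-- The cyclic run of length k < n starting at s (0 ≤ s < n) is a contiguous slice
-- of the doubled list.
lemma doubled_slice_eq (sequence : List Int) (hne : sequence ≠ [])
    (s k : Nat) (hs : s < sequence.length) (hk : k < sequence.length) :
    ((sequence ++ sequence).drop s).take k
      = (List.range k).map
          (fun (i : Nat) => PySem.List.pyGetD sequence (((s : Int) + (i : Int)) % (sequence.length : Int)) 0) := by
  have hn : 0 < sequence.length := List.length_pos_of_ne_nil hne
  apply List.ext_getElem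
  · simp [List.length_take, List.length_drop]; omega
  · intro i h1 h2
    have hik : i < k := by
      have := h1; simp [List.length_take, List.length_drop] at this; omega
    have hlt2 : s + i < sequence.length + sequence.length := by omega
    rw [List.getElem_take, List.getElem_drop, List.getElem_map, List.getElem_range]
    have hmodint : ((s : Int) + (i : Int)) % (sequence.length : Int)
        = (((s + i) % sequence.length : Nat) : Int) := by
      have := Int.natCast_mod (s + i) sequence.length
      push_cast at this ⊢; omega
    rw [hmodint, PySem.List.pyGetD_natCast]
    have hmlt : (s + i) % sequence.length < sequence.length := Nat.mod_lt _ hn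
    rw [List.getD_eq_getElem sequence 0 hmlt]
    rcases Nat.lt_or_ge (s + i) sequence.length with hcase | hcase
    · rw [List.getElem_append_left (by omega)]
      congr 1
      exact (Nat.mod_eq_of_lt hcase).symm
    · rw [List.getElem_append_right (by omega)]
      congr 1
      rw [Nat.mod_eq_sub_mod hcase, Nat.mod_eq_of_lt (by omega : s + i - sequence.length < sequence.length)]
  
-- ===== VERDICT (by name: the statement is the Claim_ definition above) =====
theorem iterate_sequence_cyclically_from_start_to_stop_spec : Claim_equal_iterate_sequence_cyclically_from_start_to_stop := by
  intro sequence start stop _ hpre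
  unfold Spec_iterate_sequence_cyclically_from_start_to_stop
  have hn : 0 < (sequence.length : Int) := by
    have : sequence.length ≠ 0 := by simpa using hpre
    omega
  have hmodeq : ∀ a : Int, PySem.Int.mod a (sequence.length : Int) = a % (sequence.length : Int) :=
    fun a => PySem.Int.mod_eq_emod_of_pos hn
  have hcs0 : 0 ≤ stop % (sequence.length : Int) := Int.emod_nonneg _ (by omega)
  have hcsn : stop % (sequence.length : Int) < (sequence.length : Int) := Int.emod_lt_of_pos _ hn
  have hb0 : 0 ≤ start % (sequence.length : Int) := Int.emod_nonneg _ (by omega)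
  have hbn : start % (sequence.length : Int) < (sequence.length : Int) := Int.emod_lt_of_pos _ hn
  have hk0 : 0 ≤ (stop - start) % (sequence.length : Int) := Int.emod_nonneg _ (by omega)
  have hkn : (stop - start) % (sequence.length : Int) < (sequence.length : Int) := Int.emod_lt_of_pos _ hn
  have hkey : (stop % (sequence.length : Int) - start) % (sequence.length : Int)
      = (stop - start) % (sequence.length : Int) := by
    rw [Int.sub_emod, Int.emod_emod_of_dvd _ (dvd_refl _), ← Int.sub_emod]
  simp only [iterate_sequence_cyclically_from_start_to_stop,
    iterate_sequence_cyclically_from_start_to_stop_alt, hmodeq]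
  rw [pvALoop_eq sequence hn (stop % (sequence.length : Int)) hcs0 hcsn
    (((stop - start) % (sequence.length : Int)).toNat) start _
    (by rw [hkey]; omega) (by omega)]
  rw [PySem.List.slice_toNat _ hb0 (by omega)]
  have htnat : (start % (sequence.length : Int) + (stop - start) % (sequence.length : Int)).toNat
      - (start % (sequence.length : Int)).toNat = ((stop - start) % (sequence.length : Int)).toNat := by
    omega
  rw [htnat,
    doubled_slice_eq sequence hpre (start % (sequence.length : Int)).toNat
      (((stop - start) % (sequence.length : Int)).toNat) (by omega) (by omega)]
  apply List.map_congr_left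
  intro i _
  congr 1
  have hcast : (((start % (sequence.length : Int)).toNat : Int)) = start % (sequence.length : Int) := by
    omega
  rw [hcast]
  conv_rhs => rw [Int.add_emod, Int.emod_emod_of_dvd _ (dvd_refl _), ← Int.add_emod]
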